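-- pv_equiv track=rewrite | github.com/samtadey/MazeSolver | beliefs/generate_scoring.py | doHamming
-- ===== SOURCE A (Python) =====
-- def doHamming(bel_arr, sent_arr):
--     set = []
--     minset = []
--
--     min = float('inf')
--     #find min states
--     for state in sent_arr:
--         min_dist = minDistance(bel_arr, state)
--         if min_dist < min:
--             min = min_dist
--             minset = []
--             minset.append(state)
--         elif min_dist == min:
--             minset.append(state)
--
--     set.append(minset)
--     poss_dist = list(range(1, len(minset[0]) + 1))
--
--     for dist in poss_dist:
--         grouping = []
--         for bel in bel_arr:
--             min = float('inf')
--             for sent in sent_arr: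
--                 #find min hamming distance to a sentence state
--                 d = hammDistance(bel, sent)
--                 if d < min:
--                     min = d
--             #if the min distance equals our category distance, add it to the category
--             if min == dist:
--                 grouping.append(bel)
--
--         set.append(grouping)
--
--     return set
--
-- def minDistance(bel_arr, sent_state):
--     min = float('inf')
--
--     for state in bel_arr:
--         dist = hammDistance(state, sent_state)
--         if dist < min:
--             min = dist
--
--     return min
--
-- def hammDistance(state1, state2):
--     if len(state1) != len(state2):
--         raise Exception('length')
--
--     dist = 0
--     for char in range(0, len(state1)):
--         if state1[char] != state2[char]:
--             dist+=1
--
--     return dist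
-- ===== SOURCE B (Python) =====
-- def doHamming(bel_arr, sent_arr):
--     # every min Hamming distance is computed once up front; groups are then cheap filters
--     def hamm(s1, s2):
--         if len(s1) != len(s2):
--             raise Exception('length')
--         return sum(map(str.__ne__, s1, s2))
--
--     sent_min = [min((hamm(b, s) for b in bel_arr), default=float('inf'))
--                 for s in sent_arr]
--     m0 = min(sent_min)
--     minset = [s for s, m in zip(sent_arr, sent_min) if m == m0]
--     L = len(minset[0])
--     mind = [min(hamm(b, s) for s in sent_arr) for b in bel_arr]
--     return [minset] + [[b for b, m in zip(bel_arr, mind) if m == d]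
--                        for d in range(1, L + 1)]
-- ===== Notes on version B (the rewrite author's own statement) =====
-- stated objective: faster
-- what changed: Instead of rescanning all bel/sent Hamming distances once per candidate bucket distance (L outer iterations), B computes each bel's minimum distance to sent_arr exactly once and then forms every bucket by a cheap filter over those precomputed values; the first bucket is built by a global min plus filter instead of a running-min-with-reset loop.
import Mathlib
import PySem

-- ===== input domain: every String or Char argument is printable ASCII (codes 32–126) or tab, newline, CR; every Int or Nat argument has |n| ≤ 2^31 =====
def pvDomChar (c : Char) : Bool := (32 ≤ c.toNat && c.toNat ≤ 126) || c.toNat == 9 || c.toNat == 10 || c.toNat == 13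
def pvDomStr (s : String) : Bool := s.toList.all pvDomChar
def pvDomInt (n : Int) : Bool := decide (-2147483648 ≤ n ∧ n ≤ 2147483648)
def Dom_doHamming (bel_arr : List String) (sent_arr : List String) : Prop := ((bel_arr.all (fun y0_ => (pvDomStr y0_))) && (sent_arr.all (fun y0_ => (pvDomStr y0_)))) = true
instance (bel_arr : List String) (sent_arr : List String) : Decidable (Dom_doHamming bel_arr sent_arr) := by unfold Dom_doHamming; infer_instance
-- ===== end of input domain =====

-- B precomputes each belief state's minimum Hamming distance to sent_arr once and buckets
-- by a filter over those values, instead of A's rescan of all distances per bucket (objective: faster).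

-- ===== PORT A =====
-- float('inf') is modelled by `none : Option Nat` (Hamming distances are the only finite values compared).
def pvLtInf (d : Nat) (m : Option Nat) : Bool :=     -- d < min  (min possibly inf)
  match m with | none => true | some v => decide (d < v)

def pvLtOO (d m : Option Nat) : Bool :=              -- min_dist < min  (both possibly inf)
  match d, m with
  | none, _ => false
  | some _, none => true
  | some a, some b => decide (a < b)

def pvEqInt (m : Option Nat) (dist : Int) : Bool :=  -- min == dist  (min possibly inf, dist an int)
  match m with | none => false | some v => (v : Int) == dist

-- hammDistance; the length-mismatch `raise` is excluded by Pre_, under which every compared pair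
-- has equal length, so indexing s2[char] is exact via getD.
def pvHammA (s1 s2 : String) : Nat :=
  (List.range s1.toList.length).foldl
    (fun dist ch => if s1.toList.getD ch ' ' ≠ s2.toList.getD ch ' ' then dist + 1 else dist) 0

def pvMinDistA (bel_arr : List String) (sent_state : String) : Option Nat :=
  bel_arr.foldl (fun m state =>
    let dist := pvHammA state sent_state
    if pvLtInf dist m then some dist else m) none

def doHamming (bel_arr : List String) (sent_arr : List String) : List (List String) :=
  let st := sent_arr.foldl (fun (st : Option Nat × List String) state =>
      let min_dist := pvMinDistA bel_arr state
      if pvLtOO min_dist st.1 then (min_dist, [state])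
      else if min_dist == st.1 then (st.1, st.2 ++ [state])
      else st) (none, ([] : List String))
  let minset := st.2
  -- len(minset[0]); minset = [] (i.e. sent_arr = []) raises IndexError, excluded by Pre_
  let L := (PySem.List.pyGetD minset 0 "").toList.length
  let poss_dist := PySem.List.pyRange 1 ((L : Int) + 1) 1
  poss_dist.foldl (fun set dist =>
      let grouping := bel_arr.foldl (fun g bel =>
          let m := sent_arr.foldl (fun m sent =>
              let d := pvHammA bel sent
              if pvLtInf d m then some d else m) none
          if pvEqInt m dist then g ++ [bel] else g) ([] : List String)
      set ++ [grouping]) [minset]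

-- ===== PORT B =====
-- sum(map(str.__ne__, s1, s2)); the length-mismatch raise is excluded by Pre_,
-- under which every compared pair has equal length.
def pvHammB (s1 s2 : String) : Nat :=
  (s1.toList.zip s2.toList).countP (fun p => p.1 != p.2)

-- min(..., default=float('inf')): none models the inf default
def pvMinToB (xs : List String) (s : String) : Option Nat :=
  PySem.List.min? (xs.map (fun x => pvHammB x s)) (fun d => d)

-- min(vals) over a nonempty list of numbers possibly inf ([] raises ValueError, excluded by Pre_)
def pvMinList (vals : List (Option Nat)) : Option Nat :=
  match vals with
  | [] => none
  | v :: rest => rest.foldl (fun a b => if pvLtOO b a then b else a) v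

def doHamming_alt (bel_arr : List String) (sent_arr : List String) : List (List String) :=
  let sent_min := sent_arr.map (fun s => pvMinToB bel_arr s)
  let m0 := pvMinList sent_min
  let minset := ((sent_arr.zip sent_min).filter (fun p => p.2 == m0)).map (fun p => p.1)
  let L := (PySem.List.pyGetD minset 0 "").toList.length
  let mind := bel_arr.map (fun b => PySem.List.min? (sent_arr.map (fun s => pvHammB b s)) (fun d => d))
  [minset] ++ (PySem.List.pyRange 1 ((L : Int) + 1) 1).map (fun d =>
      ((bel_arr.zip mind).filter (fun p => pvEqInt p.2 d)).map (fun p => p.1))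

-- ===== PRECONDITION & SPEC =====
-- Pre_ is exactly A's no-raise domain: sent_arr nonempty (else minset[0] raises IndexError) and,
-- whenever a bel/sent pair is compared, equal lengths (else hammDistance raises).
def Pre_doHamming (bel_arr : List String) (sent_arr : List String) : Prop :=
  sent_arr ≠ [] ∧ ∀ b ∈ bel_arr, ∀ s ∈ sent_arr, b.toList.length = s.toList.length
instance (bel_arr : List String) (sent_arr : List String) : Decidable (Pre_doHamming bel_arr sent_arr) := by unfold Pre_doHamming; infer_instance

def pvWitness_doHamming : List String × List String := (["ab", "bb"], ["aa", "ba"])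

def Spec_doHamming (bel_arr : List String) (sent_arr : List String) (out : List (List String)) : Prop := out = doHamming_alt bel_arr sent_arr
instance (bel_arr : List String) (sent_arr : List String) (out : List (List String)) : Decidable (Spec_doHamming bel_arr sent_arr out) := by unfold Spec_doHamming; infer_instance

-- ===== CLAIM (what is proved, stated in full; the proofs are below) =====
def Claim_equal_doHamming : Prop := ∀ (bel_arr : List String) (sent_arr : List String), Dom_doHamming bel_arr sent_arr → Pre_doHamming bel_arr sent_arr → Spec_doHamming bel_arr sent_arr (doHamming bel_arr sent_arr)

-- ===== LEMMAS AND PROOFS =====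

def pvMinO (a b : Option Nat) : Option Nat := if pvLtOO b a then b else a

theorem runmin_some (f : String → Nat) : ∀ (t : List String) (a : Nat),
    t.foldl (fun m s => if pvLtInf (f s) m then some (f s) else m) (some a)
      = some (t.foldl (fun a s => min a (f s)) a) := by
  intro t
  induction t with
  | nil => intro a; rfl
  | cons x t ih =>
    intro a
    simp only [List.foldl_cons]
    rw [show (if pvLtInf (f x) (some a) then some (f x) else some a) = some (min a (f x)) by
      by_cases h : f x < a <;> simp [pvLtInf, h] <;> omega]
    rw [ih]

theorem runmin (f : String → Nat) (l : List String) :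
    l.foldl (fun m s => if pvLtInf (f s) m then some (f s) else m) none
      = PySem.List.min? (l.map f) (fun d => d) := by
  cases l with
  | nil => rfl
  | cons x t =>
    simp only [List.foldl_cons, List.map_cons]
    rw [show (if pvLtInf (f x) none then some (f x) else none) = some (f x) by simp [pvLtInf]]
    rw [runmin_some, PySem.List.min?_id_cons, List.foldl_map]

theorem pvLtOO_irrefl (a : Option Nat) : pvLtOO a a = false := by
  cases a <;> simp [pvLtOO]

theorem pvLtOO_trans {a b c : Option Nat} (h1 : pvLtOO a b = true) (h2 : pvLtOO b c = true) :
    pvLtOO a c = true := by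
  cases a <;> cases b <;> cases c <;> simp_all [pvLtOO] <;> omega

theorem foldmin_le (f : String → Option Nat) : ∀ (t : List String) (m : Option Nat),
    (t.foldl (fun a s => pvMinO a (f s)) m) = m ∨ pvLtOO (t.foldl (fun a s => pvMinO a (f s)) m) m = true := by
  intro t
  induction t with
  | nil => intro m; left; rfl
  | cons x t ih =>
    intro m
    simp only [List.foldl_cons]
    by_cases hx : pvLtOO (f x) m = true
    · have e : pvMinO m (f x) = f x := by simp [pvMinO, hx]
      rw [e]
      rcases ih (f x) with h | h
      · right; rw [h]; exact hx
      · right; exact pvLtOO_trans h hx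
    · have e : pvMinO m (f x) = m := by simp [pvMinO, hx]
      rw [e]; exact ih m

theorem resetfold (f : String → Option Nat) : ∀ (t : List String) (m : Option Nat) (ms : List String),
    t.foldl (fun st s =>
        if pvLtOO (f s) st.1 then (f s, [s])
        else if f s == st.1 then (st.1, st.2 ++ [s])
        else st) (m, ms)
      = (t.foldl (fun a s => pvMinO a (f s)) m,
         (if t.foldl (fun a s => pvMinO a (f s)) m = m then ms else [])
           ++ t.filter (fun s => f s == t.foldl (fun a s => pvMinO a (f s)) m)) := by
  intro t
  induction t with
  | nil => intro m ms; simp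
  | cons x t ih =>
    intro m ms
    simp only [List.foldl_cons, List.filter_cons]
    by_cases hx : pvLtOO (f x) m = true
    · have e : pvMinO m (f x) = f x := by simp [pvMinO, hx]
      rw [show (if pvLtOO (f x) (m, ms).1 then (f x, [x])
            else if f x == (m, ms).1 then ((m, ms).1, (m, ms).2 ++ [x]) else (m, ms)) = (f x, [x]) by
          simp [hx]]
      simp only [e]
      rw [ih]
      have hle := foldmin_le f t (f x)
      have hMm : ¬ t.foldl (fun a s => pvMinO a (f s)) (f x) = m := by
        intro hq
        rcases hle with h | h
        · rw [hq] at h; rw [← h] at hx; simp [pvLtOO_irrefl] at hx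
        · rw [hq] at h; have h2 := pvLtOO_trans hx h; simp [pvLtOO_irrefl] at h2
      by_cases hfx : t.foldl (fun a s => pvMinO a (f s)) (f x) = f x
      · rw [hfx] at hMm; simp [hfx, hMm]
      · have hb : (f x == t.foldl (fun a s => pvMinO a (f s)) (f x)) = false :=
          beq_eq_false_iff_ne.mpr (fun h => hfx h.symm)
        simp [hfx, hMm, hb]
    · have e : pvMinO m (f x) = m := by simp [pvMinO, hx]
      simp only [e]
      have hle := foldmin_le f t m
      by_cases heq : (f x == m) = true
      · rw [show (if pvLtOO (f x) (m, ms).1 then (f x, [x])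
              else if f x == (m, ms).1 then ((m, ms).1, (m, ms).2 ++ [x]) else (m, ms))
              = (m, ms ++ [x]) by simp [hx, heq]]
        rw [ih]
        by_cases hMm : t.foldl (fun a s => pvMinO a (f s)) m = m
        · have hfm : f x = m := beq_iff_eq.mp heq
          simp [hMm, hfm]
        · have hfx : (f x == t.foldl (fun a s => pvMinO a (f s)) m) = false := by
            apply beq_eq_false_iff_ne.mpr
            intro h
            exact hMm (by rw [← h]; exact beq_iff_eq.mp heq)
          simp [hMm, hfx]
      · have heq' : (f x == m) = false := by simpa using heq
        rw [show (if pvLtOO (f x) (m, ms).1 then (f x, [x])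
              else if f x == (m, ms).1 then ((m, ms).1, (m, ms).2 ++ [x]) else (m, ms))
              = (m, ms) by simp [hx, heq']]
        rw [ih]
        have hfx : (f x == t.foldl (fun a s => pvMinO a (f s)) m) = false := by
          apply beq_eq_false_iff_ne.mpr
          intro h
          rcases hle with h2 | h2
          · rw [h2] at h; exact heq (beq_iff_eq.mpr h)
          · rw [← h] at h2; exact hx h2
        simp [hfx]

theorem pvMinList_eq (f : String → Option Nat) (l : List String) :
    pvMinList (l.map f) = l.foldl (fun a s => pvMinO a (f s)) none := by
  cases l with
  | nil => rfl
  | cons x t =>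
    simp only [List.map_cons, pvMinList, List.foldl_cons, List.foldl_map]
    have e : pvMinO none (f x) = f x := by cases h : f x <;> simp [pvMinO, pvLtOO, h]
    rw [e]
    rfl

theorem zipmapfilter (g : String → Option Nat) (q : Option Nat → Bool) : ∀ (l : List String),
    ((l.zip (l.map g)).filter (fun p => q p.2)).map (fun p => p.1) = l.filter (fun b => q (g b)) := by
  intro l
  induction l with
  | nil => rfl
  | cons x t ih =>
    simp only [List.map_cons, List.zip_cons_cons, List.filter_cons]
    by_cases h : q (g x) = true <;> simp [h, ih]

theorem hamm_lists (l1 : List Char) : ∀ (l2 : List Char) (a : Nat), l1.length = l2.length →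
    (List.range l1.length).foldl (fun d i => if l1.getD i ' ' ≠ l2.getD i ' ' then d + 1 else d) a
      = a + (l1.zip l2).countP (fun p => p.1 != p.2) := by
  induction l1 with
  | nil => intro l2 a h; simp
  | cons c t ih =>
    intro l2 a h
    cases l2 with
    | nil => simp at h
    | cons d t2 =>
      simp only [List.length_cons, List.range_succ_eq_map, List.foldl_cons, List.foldl_map,
        List.zip_cons_cons, List.countP_cons]
      have h' : t.length = t2.length := by simpa using h
      rw [show (fun (dd : Nat) (i : Nat) =>
          if (c :: t).getD (i + 1) ' ' ≠ (d :: t2).getD (i + 1) ' ' then dd + 1 else dd)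
          = (fun (dd : Nat) (i : Nat) => if t.getD i ' ' ≠ t2.getD i ' ' then dd + 1 else dd) by
        funext dd i; simp]
      rw [ih t2 _ h']
      by_cases hc : c = d
      · simp [hc]
      · have : ((c, d).1 != (c, d).2) = true := by simp [hc]
        simp [hc, this]
        omega

theorem hamm_eq (s1 s2 : String) (h : s1.toList.length = s2.toList.length) :
    pvHammA s1 s2 = pvHammB s1 s2 := by
  unfold pvHammA pvHammB
  rw [hamm_lists s1.toList s2.toList 0 h]
  omega

-- ===== VERDICT (by name: the statement is the Claim_ definition above) =====
theorem doHamming_spec : Claim_equal_doHamming := by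
  intro bel_arr sent_arr _hdom hpre
  obtain ⟨hne, hlen⟩ := hpre
  unfold Spec_doHamming doHamming doHamming_alt
  -- A's first loop: running-min-with-reset = (global min, its attainers)
  rw [resetfold (fun s => pvMinDistA bel_arr s) sent_arr none []]
  simp only [ite_self]
  have hf : ∀ s ∈ sent_arr, pvMinDistA bel_arr s = pvMinToB bel_arr s := by
    intro s hs
    unfold pvMinDistA pvMinToB
    rw [runmin (fun b => pvHammA b s)]
    rw [List.map_congr_left (fun b hb => hamm_eq b s (hlen b hb s hs))]
  have hM : List.foldl (fun a s => pvMinO a (pvMinDistA bel_arr s)) none sent_arr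
      = pvMinList (List.map (fun s => pvMinToB bel_arr s) sent_arr) := by
    rw [pvMinList_eq]
    apply PySem.List.foldl_congr_mem
    intro acc x hx
    rw [hf x hx]
  have hminset : List.filter
        (fun s => pvMinDistA bel_arr s == List.foldl (fun a s => pvMinO a (pvMinDistA bel_arr s)) none sent_arr)
        sent_arr
      = List.filter (fun s => pvMinToB bel_arr s == pvMinList (List.map (fun s => pvMinToB bel_arr s) sent_arr))
        sent_arr := by
    apply List.filter_congr
    intro x hx
    rw [hf x hx, hM]
  rw [zipmapfilter (fun s => pvMinToB bel_arr s)
        (fun v => v == pvMinList (List.map (fun s => pvMinToB bel_arr s) sent_arr))]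
  rw [hminset]
  rw [PySem.List.foldl_append_singleton_eq_map]
  simp only [List.nil_append]
  congr 1
  apply List.map_congr_left
  intro dist _hd
  rw [PySem.List.foldl_append_if_eq_filter]
  rw [zipmapfilter (fun b => PySem.List.min? (List.map (fun s => pvHammB b s) sent_arr) (fun d => d))
        (fun v => pvEqInt v dist)]
  simp only [List.nil_append]
  apply List.filter_congr
  intro bel hb
  rw [runmin (fun sent => pvHammA bel sent)]
  rw [List.map_congr_left (fun s hs => hamm_eq bel s (hlen bel hb s hs))]
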